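-- pv_equiv track=rewrite | github.com/Jithin-caz/graphColoring_QAOA | main.py | count_vertex_conflicts
-- ===== SOURCE A (Python) =====
-- from collections import defaultdict
-- from typing import Dict, List, Optional, Tuple
--
-- def count_vertex_conflicts(communities: Dict[int, List[int]],
--                            sub_colorings: Dict[int, Dict[int, int]]) -> int:
--     """
--     Paper Eq.(3): conflict(u)=1 if node u appears in multiple subgraphs
--     Si, Sj with c_{Si}(u) ≠ c_{Sj}(u).
--     """
--     node_colors: Dict[int, Dict[int, int]] = defaultdict(dict)
--     for cid, nodes in communities.items():
--         col = sub_colorings.get(cid, {})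
--         for n in nodes:
--             if n in col:
--                 node_colors[n][cid] = col[n]
--     return sum(
--         1 for cid_col in node_colors.values()
--         if len(set(cid_col.values())) > 1
--     )
-- ===== SOURCE B (Python) =====
-- def count_vertex_conflicts(communities, sub_colorings):
--     """Single pass: remember the first color seen per node and flag a node as
--     conflicted as soon as some later community colors it differently."""
--     rep = {}
--     conflicted = set()
--     for cid, nodes in communities.items():
--         col = sub_colorings.get(cid, {})
--         for n in nodes:
--             if n in col:
--                 c = col[n]
--                 if n not in rep:
--                     rep[n] = c
--                 elif rep[n] != c:
--                     conflicted.add(n)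
--     return len(conflicted)
-- ===== Notes on version B (the rewrite author's own statement) =====
-- stated objective: simpler
-- what changed: Instead of materializing a per-node dict of all (community, color) pairs and then counting nodes whose color-set has size > 1, B keeps only the first color seen per node plus a conflicted-node set, detecting disagreement inline in one pass and returning the set's size.
import Mathlib
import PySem

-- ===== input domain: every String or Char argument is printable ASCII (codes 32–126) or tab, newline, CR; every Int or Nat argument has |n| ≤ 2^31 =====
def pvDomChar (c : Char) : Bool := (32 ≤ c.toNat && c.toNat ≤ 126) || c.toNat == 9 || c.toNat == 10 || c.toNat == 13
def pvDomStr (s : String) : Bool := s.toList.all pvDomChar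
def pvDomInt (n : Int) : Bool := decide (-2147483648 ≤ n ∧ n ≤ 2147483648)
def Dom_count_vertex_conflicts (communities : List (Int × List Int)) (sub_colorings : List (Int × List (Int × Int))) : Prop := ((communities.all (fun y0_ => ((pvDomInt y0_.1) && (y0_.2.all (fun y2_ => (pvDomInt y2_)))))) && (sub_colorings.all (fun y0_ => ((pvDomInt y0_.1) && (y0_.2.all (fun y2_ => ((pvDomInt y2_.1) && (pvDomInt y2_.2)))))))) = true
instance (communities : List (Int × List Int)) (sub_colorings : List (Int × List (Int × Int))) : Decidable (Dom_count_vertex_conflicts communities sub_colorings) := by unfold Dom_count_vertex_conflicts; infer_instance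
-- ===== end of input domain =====

-- B replaces A's per-node dict of all (community, color) pairs by a first-color map plus
-- a conflicted-node set maintained inline in one pass (objective: simpler).

-- ===== PORT A =====
-- one outer iteration of A's loop: record (cid, color) for every node of the community colored there
def pvStepA (sub_colorings : List (Int × List (Int × Int)))
    (nc : PySem.Dict Int (PySem.Dict Int Int)) (p : Int × List Int) :
    PySem.Dict Int (PySem.Dict Int Int) :=
  let col : PySem.Dict Int Int := PySem.Dict.mk ((PySem.Dict.mk sub_colorings).getD p.1 [])
  p.2.foldl (fun nc n =>
    if col.contains n then
      nc.insert n ((nc.getD n PySem.Dict.empty).insert p.1 (col.getD n 0))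
    else nc) nc

def count_vertex_conflicts (communities : List (Int × List Int)) (sub_colorings : List (Int × List (Int × Int))) : Int :=
  let node_colors := communities.foldl (pvStepA sub_colorings) PySem.Dict.empty
  node_colors.values.foldl
    (fun acc cid_col => if 1 < (PySem.Set.ofList cid_col.values).length then acc + 1 else acc) 0

-- ===== PORT B =====
-- one outer iteration of B's loop: first color per node in rep, disagreeing nodes into conflicted
def pvStepB (sub_colorings : List (Int × List (Int × Int)))
    (st : PySem.Dict Int Int × PySem.Set Int) (p : Int × List Int) :
    PySem.Dict Int Int × PySem.Set Int :=
  let col : PySem.Dict Int Int := PySem.Dict.mk ((PySem.Dict.mk sub_colorings).getD p.1 [])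
  p.2.foldl (fun st n =>
    if col.contains n then
      let c := col.getD n 0
      match st.1.get? n with
      | none => (st.1.insert n c, st.2)
      | some r => (st.1, if r ≠ c then st.2.add n else st.2)
    else st) st

def count_vertex_conflicts_alt (communities : List (Int × List Int)) (sub_colorings : List (Int × List (Int × Int))) : Int :=
  let st := communities.foldl (pvStepB sub_colorings) (PySem.Dict.empty, PySem.Set.empty)
  (st.2.length : Int)

-- ===== PRECONDITION & SPEC =====
def Spec_count_vertex_conflicts (communities : List (Int × List Int)) (sub_colorings : List (Int × List (Int × Int))) (out : Int) : Prop := out = count_vertex_conflicts_alt communities sub_colorings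
instance (communities : List (Int × List Int)) (sub_colorings : List (Int × List (Int × Int))) (out : Int) : Decidable (Spec_count_vertex_conflicts communities sub_colorings out) := by unfold Spec_count_vertex_conflicts; infer_instance

-- ===== CLAIM (what is proved, stated in full; the proofs are below) =====
def Claim_equal_count_vertex_conflicts : Prop := ∀ (communities : List (Int × List Int)) (sub_colorings : List (Int × List (Int × Int))), Dom_count_vertex_conflicts communities sub_colorings → Spec_count_vertex_conflicts communities sub_colorings (count_vertex_conflicts communities sub_colorings)

-- ===== LEMMAS AND PROOFS =====

-- the color community cid assigns to node n, if any
def pvColorOf (sub : List (Int × List (Int × Int))) (cid n : Int) : Option Int :=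
  (PySem.Dict.mk ((PySem.Dict.mk sub).getD cid [])).get? n

-- invariant tying A's node_colors to B's (rep, conflicted)
def pvInv (sub : List (Int × List (Int × Int)))
    (nc : PySem.Dict Int (PySem.Dict Int Int))
    (rep : PySem.Dict Int Int) (conf : PySem.Set Int) : Prop :=
  nc.keys.Nodup ∧ conf.Nodup ∧
  (∀ n, (nc.getD n PySem.Dict.empty).keys.Nodup) ∧
  (∀ n cid c, (cid, c) ∈ (nc.getD n PySem.Dict.empty).items → pvColorOf sub cid n = some c) ∧
  (∀ n, rep.get? n = ((nc.getD n PySem.Dict.empty).values).head?) ∧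
  (∀ n, n ∈ conf ↔ ∃ c ∈ (nc.getD n PySem.Dict.empty).values,
      some c ≠ ((nc.getD n PySem.Dict.empty).values).head?)

theorem pvInv_init (sub : List (Int × List (Int × Int))) :
    pvInv sub PySem.Dict.empty PySem.Dict.empty PySem.Set.empty := by
  have hitems : (PySem.Dict.empty : PySem.Dict Int Int).items = [] := rfl
  refine ⟨List.nodup_nil, List.nodup_nil, fun n => ?_, fun n cid c => ?_, fun n => ?_, fun n => ?_⟩ <;>
    simp [PySem.Dict.getD_empty, PySem.Dict.get?_empty, PySem.Set.empty, hitems, PySem.Dict.values]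


theorem pvInv_event (sub : List (Int × List (Int × Int))) (cid : Int) (col : PySem.Dict Int Int)
    (hcol : ∀ m, col.get? m = pvColorOf sub cid m) (n : Int)
    (nc : PySem.Dict Int (PySem.Dict Int Int)) (rep : PySem.Dict Int Int) (conf : PySem.Set Int)
    (h : pvInv sub nc rep conf) :
    pvInv sub
      (if col.contains n then
         nc.insert n ((nc.getD n PySem.Dict.empty).insert cid (col.getD n 0)) else nc)
      (if col.contains n then
         (match rep.get? n with
          | none => (rep.insert n (col.getD n 0), conf)
          | some r => (rep, if r ≠ (col.getD n 0) then conf.add n else conf))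
       else (rep, conf)).1
      (if col.contains n then
         (match rep.get? n with
          | none => (rep.insert n (col.getD n 0), conf)
          | some r => (rep, if r ≠ (col.getD n 0) then conf.add n else conf))
       else (rep, conf)).2 := by
  obtain ⟨h1, h5, h6, h2, h3, h4⟩ := h
  by_cases hc : col.contains n = true
  · obtain ⟨c, hcget⟩ : ∃ c, col.get? n = some c := by
      have := PySem.Dict.contains_eq_isSome_get? col n
      rw [hc] at this
      exact Option.isSome_iff_exists.mp this.symm
    have hgetD : col.getD n 0 = c := by
      rw [PySem.Dict.getD_eq_get?_getD, hcget]; rfl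
    have hcolor : pvColorOf sub cid n = some c := by rw [← hcol n]; exact hcget
    simp only [hc, ↓reduceIte, hgetD]
    rcases hv : rep.get? n with _ | r
    · -- n is seen for the first time
      have hvals : (nc.getD n PySem.Dict.empty).values = [] :=
        List.head?_eq_none_iff.mp ((h3 n).symm.trans hv)
      have hitems : (nc.getD n PySem.Dict.empty).items = [] := by
        simp only [PySem.Dict.values] at hvals
        exact List.map_eq_nil_iff.mp hvals
      have hinner : nc.getD n PySem.Dict.empty = PySem.Dict.empty := by
        apply PySem.Dict.ext; rw [hitems]; rfl
      show pvInv sub (nc.insert n ((nc.getD n PySem.Dict.empty).insert cid c))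
        (rep.insert n c) conf
      rw [hinner]
      refine ⟨PySem.Dict.nodup_keys_insert _ _ _ h1, h5, ?_, ?_, ?_, ?_⟩
      · intro m
        rw [PySem.Dict.getD_insert]
        by_cases hmn : m = n
        · rw [if_pos hmn]; exact List.nodup_singleton cid
        · rw [if_neg hmn]; exact h6 m
      · intro m cid' c'
        rw [PySem.Dict.getD_insert]
        by_cases hmn : m = n
        · subst hmn
          rw [if_pos rfl]
          intro hmem
          have hmem' : (cid', c') ∈ [(cid, c)] := hmem
          simp only [List.mem_singleton, Prod.mk.injEq] at hmem'
          obtain ⟨rfl, rfl⟩ := hmem'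
          exact hcolor
        · rw [if_neg hmn]; exact h2 m cid' c'
      · intro m
        rw [PySem.Dict.get?_insert, PySem.Dict.getD_insert]
        by_cases hmn : m = n
        · rw [if_pos hmn, if_pos hmn]; rfl
        · rw [if_neg hmn, if_neg hmn]; exact h3 m
      · intro m
        rw [PySem.Dict.getD_insert]
        by_cases hmn : m = n
        · subst hmn
          rw [if_pos rfl]
          constructor
          · intro hm
            have := (h4 m).mp hm
            rw [hvals] at this
            simp at this
          · rintro ⟨c', hc', hne⟩
            have hvv : (PySem.Dict.empty.insert cid c : PySem.Dict Int Int).values = [c] := rfl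
            rw [hvv] at hc' hne
            have hc'' : c' = c := List.mem_singleton.mp hc'
            subst hc''
            exact absurd rfl hne
        · rw [if_neg hmn]; exact h4 m
    · -- n already has a first color r
      have hhead : (nc.getD n PySem.Dict.empty).values.head? = some r := (h3 n).symm.trans hv
      obtain ⟨tl, hvals⟩ : ∃ tl, (nc.getD n PySem.Dict.empty).values = r :: tl := by
        cases hvv : (nc.getD n PySem.Dict.empty).values with
        | nil => rw [hvv] at hhead; cases hhead
        | cons a l =>
            rw [hvv] at hhead
            simp only [List.head?_cons, Option.some_inj] at hhead
            exact ⟨l, by rw [hhead]⟩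
      show pvInv sub (nc.insert n ((nc.getD n PySem.Dict.empty).insert cid c))
        rep (if r ≠ c then conf.add n else conf)
      by_cases hcid : (nc.getD n PySem.Dict.empty).contains cid = true
      · -- cid already recorded for n with the same color: A's insert is a no-op
        obtain ⟨c', hc'⟩ : ∃ c', (nc.getD n PySem.Dict.empty).get? cid = some c' := by
          have := PySem.Dict.contains_eq_isSome_get? (nc.getD n PySem.Dict.empty) cid
          rw [hcid] at this
          exact Option.isSome_iff_exists.mp this.symm
        have hmemit : (cid, c') ∈ (nc.getD n PySem.Dict.empty).items :=
          PySem.Dict.mem_items_of_get?_eq_some _ hc'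
        have hcc : c' = c := by
          have := h2 n cid c' hmemit
          rw [hcolor] at this
          exact (Option.some_inj.mp this).symm
        subst hcc
        have hmemkeys : n ∈ nc.keys := by
          by_contra hmem
          have hncf : nc.contains n = false := by
            rcases Bool.eq_false_or_eq_true (nc.contains n) with h0 | h0
            · exact absurd ((PySem.Dict.contains_iff_mem_keys nc n).mp h0) hmem
            · exact h0
          have := PySem.Dict.getD_of_not_contains nc (d0 := PySem.Dict.empty) hncf
          rw [this] at hvals
          cases hvals
        have hins : (nc.getD n PySem.Dict.empty).insert cid c' = nc.getD n PySem.Dict.empty := by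
          apply PySem.Dict.ext
          rw [PySem.Dict.items_insert_of_contains _ _ hcid]
          have : List.map (fun p => if (p.1 == cid) = true then (cid, c') else p)
              (nc.getD n PySem.Dict.empty).items
              = List.map id (nc.getD n PySem.Dict.empty).items := by
            apply List.map_congr_left
            intro p hp
            by_cases hpk : (p.1 == cid) = true
            · rw [if_pos hpk]
              have hk : p.1 = cid := by simpa using hpk
              have hg := PySem.Dict.get?_of_mem_items _ (by exact hp) (h6 n)
              rw [hk, hc'] at hg
              have hv2 : p.2 = c' := (Option.some_inj.mp hg).symm
              show (cid, c') = p
              rw [← hk, ← hv2]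
            · rw [if_neg hpk]; rfl
          rw [this, List.map_id]
        have houter : nc.insert n (nc.getD n PySem.Dict.empty) = nc := by
          have hcont : nc.contains n = true := (PySem.Dict.contains_iff_mem_keys nc n).mpr hmemkeys
          obtain ⟨d', hd'⟩ : ∃ d', nc.get? n = some d' := by
            have := PySem.Dict.contains_eq_isSome_get? nc n
            rw [hcont] at this
            exact Option.isSome_iff_exists.mp this.symm
          have hdg : nc.getD n PySem.Dict.empty = d' := by
            rw [PySem.Dict.getD_eq_get?_getD, hd']; rfl
          rw [hdg]
          apply PySem.Dict.ext
          rw [PySem.Dict.items_insert_of_contains _ _ hcont]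
          have : List.map (fun p => if (p.1 == n) = true then (n, d') else p) nc.items
              = List.map id nc.items := by
            apply List.map_congr_left
            intro p hp
            by_cases hpk : (p.1 == n) = true
            · rw [if_pos hpk]
              have hk : p.1 = n := by simpa using hpk
              have hg := PySem.Dict.get?_of_mem_items _ (by exact hp) h1
              rw [hk, hd'] at hg
              have hv2 : p.2 = d' := (Option.some_inj.mp hg).symm
              show (n, d') = p
              rw [← hk, ← hv2]
            · rw [if_neg hpk]; rfl
          rw [this, List.map_id]
        rw [hins, houter]
        have hcv : c' ∈ (nc.getD n PySem.Dict.empty).values := by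
          simp only [PySem.Dict.values]
          exact List.mem_map.mpr ⟨(cid, c'), hmemit, rfl⟩
        by_cases hrc : r = c'
        · rw [if_neg (not_not_intro hrc)]
          exact ⟨h1, h5, h6, h2, h3, h4⟩
        · rw [if_pos hrc]
          have hnconf : n ∈ conf := (h4 n).mpr
            ⟨c', hcv, by rw [hhead]; exact fun h0 => hrc (Option.some_inj.mp h0).symm⟩
          rw [PySem.Set.add_of_mem hnconf]
          exact ⟨h1, h5, h6, h2, h3, h4⟩
      · -- cid is new for n: A appends (cid, c) to n's per-community colors
        have hcf : (nc.getD n PySem.Dict.empty).contains cid = false := by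
          rcases Bool.eq_false_or_eq_true ((nc.getD n PySem.Dict.empty).contains cid) with h0 | h0
          · exact absurd h0 hcid
          · exact h0
        have hitemsi : ((nc.getD n PySem.Dict.empty).insert cid c).items
            = (nc.getD n PySem.Dict.empty).items ++ [(cid, c)] :=
          PySem.Dict.items_insert_of_not_contains _ _ hcf
        have hvalsi : ((nc.getD n PySem.Dict.empty).insert cid c).values
            = (nc.getD n PySem.Dict.empty).values ++ [c] := by
          simp only [PySem.Dict.values, hitemsi, List.map_append, List.map_cons, List.map_nil]
        refine ⟨PySem.Dict.nodup_keys_insert _ _ _ h1, ?_, ?_, ?_, ?_, ?_⟩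
        · split
          · exact PySem.Set.nodup_add _ _ h5
          · exact h5
        · intro m
          rw [PySem.Dict.getD_insert]
          by_cases hmn : m = n
          · rw [if_pos hmn]; exact PySem.Dict.nodup_keys_insert _ _ _ (h6 n)
          · rw [if_neg hmn]; exact h6 m
        · intro m cid' c'
          rw [PySem.Dict.getD_insert]
          by_cases hmn : m = n
          · subst hmn
            rw [if_pos rfl, hitemsi]
            intro hmem
            rcases List.mem_append.mp hmem with h0 | h0
            · exact h2 m cid' c' h0
            · simp only [List.mem_singleton, Prod.mk.injEq] at h0
              obtain ⟨rfl, rfl⟩ := h0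
              exact hcolor
          · rw [if_neg hmn]; exact h2 m cid' c'
        · intro m
          rw [PySem.Dict.getD_insert]
          by_cases hmn : m = n
          · subst hmn
            rw [if_pos rfl, hvalsi, hvals, hv]
            simp
          · rw [if_neg hmn]; exact h3 m
        · intro m
          rw [PySem.Dict.getD_insert]
          by_cases hmn : m = n
          · subst hmn
            rw [if_pos rfl, hvalsi, hvals]
            by_cases hrc : r = c
            · subst hrc
              rw [if_neg (not_not_intro rfl), h4 m, hvals]
              have hh1 : (r :: tl).head? = some r := rfl
              have hh2 : ((r :: tl) ++ [r]).head? = some r := rfl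
              rw [hh1, hh2]
              constructor
              · rintro ⟨c', hc', hne⟩
                exact ⟨c', List.mem_append_left _ hc', hne⟩
              · rintro ⟨c', hc', hne⟩
                rcases List.mem_append.mp hc' with h0 | h0
                · exact ⟨c', h0, hne⟩
                · exact absurd (congrArg some (List.mem_singleton.mp h0)) hne
            · rw [if_pos hrc, PySem.Set.mem_add]
              have hh2 : ((r :: tl) ++ [c]).head? = some r := rfl
              rw [hh2]
              constructor
              · intro _
                exact ⟨c, by simp, fun h0 => hrc (Option.some_inj.mp h0).symm⟩
              · intro _
                exact Or.inr rfl
          · rw [if_neg hmn]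
            split
            · rw [PySem.Set.mem_add]
              constructor
              · rintro (hm | rfl)
                · exact (h4 m).mp hm
                · exact absurd rfl hmn
              · intro he
                exact Or.inl ((h4 m).mpr he)
            · exact h4 m
  · have hcf : col.contains n = false := by
      rcases Bool.eq_false_or_eq_true (col.contains n) with h0 | h0
      · exact absurd h0 hc
      · exact h0
    simp only [hcf, Bool.false_eq_true, ↓reduceIte]
    exact ⟨h1, h5, h6, h2, h3, h4⟩

theorem pvInv_inner (sub : List (Int × List (Int × Int))) (cid : Int) (col : PySem.Dict Int Int)
    (hcol : ∀ m, col.get? m = pvColorOf sub cid m) (ns : List Int)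
    (nc : PySem.Dict Int (PySem.Dict Int Int)) (rep : PySem.Dict Int Int) (conf : PySem.Set Int)
    (h : pvInv sub nc rep conf) :
    pvInv sub
      (ns.foldl (fun nc n =>
        if col.contains n then
          nc.insert n ((nc.getD n PySem.Dict.empty).insert cid (col.getD n 0))
        else nc) nc)
      (ns.foldl (fun st n =>
        if col.contains n then
          let c := col.getD n 0
          match st.1.get? n with
          | none => (st.1.insert n c, st.2)
          | some r => (st.1, if r ≠ c then st.2.add n else st.2)
        else st) (rep, conf)).1
      (ns.foldl (fun st n =>
        if col.contains n then
          let c := col.getD n 0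
          match st.1.get? n with
          | none => (st.1.insert n c, st.2)
          | some r => (st.1, if r ≠ c then st.2.add n else st.2)
        else st) (rep, conf)).2 := by
  induction ns generalizing nc rep conf with
  | nil => exact h
  | cons x ns ih =>
      simp only [List.foldl_cons]
      have hev := pvInv_event sub cid col hcol x nc rep conf h
      have := ih _ _ _ hev
      simpa using this

theorem pvInv_step (sub : List (Int × List (Int × Int)))
    (nc : PySem.Dict Int (PySem.Dict Int Int)) (rep : PySem.Dict Int Int) (conf : PySem.Set Int)
    (h : pvInv sub nc rep conf) (p : Int × List Int) :
    pvInv sub (pvStepA sub nc p) (pvStepB sub (rep, conf) p).1 (pvStepB sub (rep, conf) p).2 := by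
  unfold pvStepA pvStepB
  exact pvInv_inner sub p.1 (PySem.Dict.mk ((PySem.Dict.mk sub).getD p.1 []))
    (fun m => rfl) p.2 nc rep conf h

theorem pvInv_fold (sub : List (Int × List (Int × Int))) (cs : List (Int × List Int))
    (nc : PySem.Dict Int (PySem.Dict Int Int)) (rep : PySem.Dict Int Int) (conf : PySem.Set Int)
    (h : pvInv sub nc rep conf) :
    pvInv sub (cs.foldl (pvStepA sub) nc)
      (cs.foldl (pvStepB sub) (rep, conf)).1 (cs.foldl (pvStepB sub) (rep, conf)).2 := by
  induction cs generalizing nc rep conf with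
  | nil => exact h
  | cons p cs ih =>
      simpa using ih _ _ _ (pvInv_step sub nc rep conf h p)

theorem pvFoldlCount {α : Type} (P : α → Prop) [DecidablePred P] (l : List α) :
    l.foldl (fun acc x => if P x then acc + 1 else acc) (0 : Int)
      = ((l.countP (fun x => decide (P x)) : Nat) : Int) := by
  suffices h : ∀ (acc : Int), l.foldl (fun acc x => if P x then acc + 1 else acc) acc
      = acc + ((l.countP (fun x => decide (P x)) : Nat) : Int) by simpa using h 0
  induction l with
  | nil => simp
  | cons x xs ih =>
      intro acc
      simp only [List.foldl_cons, List.countP_cons]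
      by_cases hx : P x
      · rw [if_pos hx, ih]
        simp [hx]
        ring
      · rw [if_neg hx, ih]
        simp [hx]

theorem pvTwoDistinct (vs : List Int) :
    1 < (PySem.Set.ofList vs).length ↔ ∃ c ∈ vs, some c ≠ vs.head? := by
  cases vs with
  | nil => simp [PySem.Set.ofList]
  | cons v tl =>
      constructor
      · intro hlen
        by_contra hno
        push Not at hno
        have hall : ∀ c ∈ v :: tl, c = v := by
          intro c hc
          have := hno c hc
          simpa using this
        have halls : ∀ c ∈ PySem.Set.ofList (v :: tl), c = v := by
          intro c hc
          exact hall c ((PySem.Set.mem_ofList _ _).mp hc)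
        have hnd := PySem.Set.nodup_ofList (v :: tl)
        rcases hs : PySem.Set.ofList (v :: tl) with _ | ⟨a, _ | ⟨b, t⟩⟩
        · rw [hs] at hlen; simp at hlen
        · rw [hs] at hlen; simp at hlen
        · rw [hs] at halls hnd
          have ha : a = v := halls a (by simp)
          have hb : b = v := halls b (by simp)
          rw [ha, hb] at hnd
          simp at hnd
      · rintro ⟨c, hc, hne⟩
        have hcv : c ≠ v := by simpa using hne
        have hcs : c ∈ PySem.Set.ofList (v :: tl) := (PySem.Set.mem_ofList _ _).mpr hc
        have hvs : v ∈ PySem.Set.ofList (v :: tl) := (PySem.Set.mem_ofList _ _).mpr (by simp)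
        rcases hs : PySem.Set.ofList (v :: tl) with _ | ⟨a, t⟩
        · rw [hs] at hvs; cases hvs
        · rw [hs] at hcs hvs
          cases t with
          | nil =>
              have h1 : c = a := by simpa using hcs
              have h2 : v = a := by simpa using hvs
              exact absurd (h1.trans h2.symm) hcv
          | cons b t' => simp
theorem pvCount_eq (sub : List (Int × List (Int × Int)))
    (nc : PySem.Dict Int (PySem.Dict Int Int)) (rep : PySem.Dict Int Int) (conf : PySem.Set Int)
    (h : pvInv sub nc rep conf) :
    nc.values.foldl
      (fun acc cid_col => if 1 < (PySem.Set.ofList cid_col.values).length then acc + 1 else acc) 0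
      = (conf.length : Int) := by
  obtain ⟨h1, h5, h6, h2, h3, h4⟩ := h
  rw [pvFoldlCount]
  rw [PySem.Dict.values_eq_map_keys nc h1 PySem.Dict.empty, List.countP_map]
  have hmem : ∀ m, m ∈ conf ↔ m ∈ nc.keys.filter
      (fun k => decide (1 < (PySem.Set.ofList ((nc.getD k PySem.Dict.empty).values)).length)) := by
    intro m
    rw [List.mem_filter, decide_eq_true_eq, pvTwoDistinct]
    constructor
    · intro hm
      obtain ⟨c, hc, hne⟩ := (h4 m).mp hm
      refine ⟨?_, ⟨c, hc, hne⟩⟩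
      by_contra hmk
      have hncf : nc.contains m = false := by
        rcases Bool.eq_false_or_eq_true (nc.contains m) with h0 | h0
        · exact absurd ((PySem.Dict.contains_iff_mem_keys nc m).mp h0) hmk
        · exact h0
      rw [PySem.Dict.getD_of_not_contains nc (d0 := PySem.Dict.empty) hncf] at hc
      cases hc
    · rintro ⟨-, hex⟩
      exact (h4 m).mpr hex
  have hperm : conf.Perm (nc.keys.filter
      (fun k => decide (1 < (PySem.Set.ofList ((nc.getD k PySem.Dict.empty).values)).length))) :=
    (List.perm_ext_iff_of_nodup h5 (h1.filter _)).mpr hmem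
  rw [List.countP_eq_length_filter]
  simp only [Function.comp_def]
  rw [← hperm.length_eq]

-- ===== VERDICT (by name: the statement is the Claim_ definition above) =====
theorem count_vertex_conflicts_spec : Claim_equal_count_vertex_conflicts := by
  intro communities sub_colorings _
  unfold Spec_count_vertex_conflicts count_vertex_conflicts count_vertex_conflicts_alt
  exact pvCount_eq sub_colorings _ _ _
    (pvInv_fold sub_colorings communities _ _ _ (pvInv_init sub_colorings))
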